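-- pv_equiv track=rewrite | github.com/Vikadie/Python-Fund-repository | Fundamentals/Text Processing/winning_ticket.py | check_ticket
-- ===== SOURCE A (Python) =====
-- def check_size(size, symbol):
--     max_count, count = 0, 0
--     flag_repeated = False
--     for char_index in range(len(size)):
--         if size[char_index] == symbol:
--             if not flag_repeated:
--                 count = 1
--                 flag_repeated = True
--             else:
--                 count += 1
--             if count > max_count:
--                 max_count = count
--         else:
--             flag_repeated = False
--             count = 0
--     return max_count
--
-- def check_ticket(ticket_size1, ticket_size2):
--     match_length = 0
--     match_symbol = None
--     for symbol in ['@', '#', '$', '^']: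
--         count1 = check_size(ticket_size1, symbol)
--         count2 = check_size(ticket_size2, symbol)
--         count = min(count1, count2)
--
--         if count > match_length:
--             match_length = count
--             match_symbol = symbol
--
--     return match_length, match_symbol
-- ===== SOURCE B (Python) =====
-- def _max_runs(s):
--     # one pass: max consecutive-run length of every character
--     runs = {}
--     prev = None
--     run = 0
--     for ch in s:
--         run = run + 1 if ch == prev else 1
--         prev = ch
--         if run > runs.get(ch, 0):
--             runs[ch] = run
--     return runs
--
-- def check_ticket(ticket_size1, ticket_size2):
--     r1 = _max_runs(ticket_size1)
--     r2 = _max_runs(ticket_size2)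
--     match_length = 0
--     match_symbol = None
--     for symbol in ['@', '#', '$', '^']:
--         count = min(r1.get(symbol, 0), r2.get(symbol, 0))
--         if count > match_length:
--             match_length = count
--             match_symbol = symbol
--     return match_length, match_symbol
-- ===== Notes on version B (the rewrite author's own statement) =====
-- stated objective: faster
-- what changed: Instead of re-scanning each half once per symbol (8 scans) with a flag/counter loop, B makes a single pass over each half building a dict of maximum consecutive-run length per character, then just looks the four symbols up.
import Mathlib
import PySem

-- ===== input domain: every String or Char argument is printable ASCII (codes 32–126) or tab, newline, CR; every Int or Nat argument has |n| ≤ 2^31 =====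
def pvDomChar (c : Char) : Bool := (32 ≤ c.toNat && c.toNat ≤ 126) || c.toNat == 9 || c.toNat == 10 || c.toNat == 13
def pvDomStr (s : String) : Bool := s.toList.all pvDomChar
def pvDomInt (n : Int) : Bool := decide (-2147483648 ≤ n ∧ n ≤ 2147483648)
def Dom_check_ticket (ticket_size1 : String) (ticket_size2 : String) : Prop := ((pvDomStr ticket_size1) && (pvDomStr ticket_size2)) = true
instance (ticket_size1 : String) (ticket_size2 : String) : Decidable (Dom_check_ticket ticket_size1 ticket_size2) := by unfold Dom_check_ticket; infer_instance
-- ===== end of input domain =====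

-- B replaces A's per-symbol re-scans by one pass per half building a max-run-per-character dict; alternative structure, same result.


-- ===== PORT A =====
-- loop body of check_size: state (max_count, count, flag_repeated)
def checkSizeStep (symbol : Char) (st : Int × Int × Bool) (ch : Char) : Int × Int × Bool :=
  if ch = symbol then
    let count := if st.2.2 then st.2.1 + 1 else 1
    let max_count := if count > st.1 then count else st.1
    (max_count, count, true)
  else (st.1, 0, false)

-- check_size: A's flag/counter scan for one symbol, loop 'for char_index in range(len(size))'
def check_size (size : String) (symbol : Char) : Int :=
  ((PySem.List.pyRange 0 (size.toList.length : Int) 1).foldl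
    (fun st i => checkSizeStep symbol st (PySem.List.pyGetD size.toList i ' '))
    (0, 0, false)).1

def check_ticket (ticket_size1 : String) (ticket_size2 : String) : Int × Option String :=
  (['@', '#', '$', '^'] : List Char).foldl
    (fun (st : Int × Option String) symbol =>
      let count1 := check_size ticket_size1 symbol
      let count2 := check_size ticket_size2 symbol
      let count := min count1 count2
      if count > st.1 then (count, some (String.ofList [symbol])) else st)
    (0, none)

-- ===== PORT B =====
-- loop body of _max_runs: state (runs, prev, run)
def maxRunsStep (st : PySem.Dict Char Int × Option Char × Int) (ch : Char) :
    PySem.Dict Char Int × Option Char × Int :=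
  let run := if some ch = st.2.1 then st.2.2 + 1 else 1
  let runs := if run > st.1.getD ch 0 then st.1.insert ch run else st.1
  (runs, some ch, run)

-- _max_runs: one pass over the string, dict of maximum consecutive-run length per character
def maxRuns (s : String) : PySem.Dict Char Int :=
  (s.toList.foldl maxRunsStep (PySem.Dict.empty, none, 0)).1

def check_ticket_alt (ticket_size1 : String) (ticket_size2 : String) : Int × Option String :=
  let r1 := maxRuns ticket_size1
  let r2 := maxRuns ticket_size2
  (['@', '#', '$', '^'] : List Char).foldl
    (fun (st : Int × Option String) symbol =>
      let count := min (r1.getD symbol 0) (r2.getD symbol 0)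
      if count > st.1 then (count, some (String.ofList [symbol])) else st)
    (0, none)

-- ===== PRECONDITION & SPEC =====
def Spec_check_ticket (ticket_size1 : String) (ticket_size2 : String) (out : Int × Option String) : Prop := out = check_ticket_alt ticket_size1 ticket_size2
instance (ticket_size1 : String) (ticket_size2 : String) (out : Int × Option String) : Decidable (Spec_check_ticket ticket_size1 ticket_size2 out) := by unfold Spec_check_ticket; infer_instance

-- ===== CLAIM (what is proved, stated in full; the proofs are below) =====
def Claim_equal_check_ticket : Prop := ∀ (ticket_size1 : String) (ticket_size2 : String), Dom_check_ticket ticket_size1 ticket_size2 → Spec_check_ticket ticket_size1 ticket_size2 (check_ticket ticket_size1 ticket_size2)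

-- ===== LEMMAS AND PROOFS =====

-- Core invariant: for a fixed symbol c, A's (max, count, flag) fold and B's (runs, prev, run) fold march in step.
theorem run_inv (cs : List Char) (c : Char)
    (stA : Int × Int × Bool) (stB : PySem.Dict Char Int × Option Char × Int)
    (hmc : stA.1 = stB.1.getD c 0)
    (hcnt : stA.2.1 = (if stB.2.1 = some c then stB.2.2 else 0))
    (hflag : stA.2.2 = decide (stB.2.1 = some c)) :
    (cs.foldl (checkSizeStep c) stA).1 = ((cs.foldl maxRunsStep stB).1).getD c 0 := by
  induction cs generalizing stA stB with
  | nil => simpa using hmc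
  | cons ch rest ih =>
    obtain ⟨mc, cnt, flag⟩ := stA
    obtain ⟨d, prev, run⟩ := stB
    simp only at hmc hcnt hflag
    subst hmc hcnt hflag
    simp only [List.foldl_cons]
    apply ih
    · -- new max = new dict entry at c
      by_cases h : ch = c
      · subst h
        by_cases hp : prev = some ch <;>
          simp [checkSizeStep, maxRunsStep, hp] <;>
          split_ifs <;> simp_all [PySem.Dict.getD_insert_self]
      · have h' : c ≠ ch := fun e => h e.symm
        simp only [checkSizeStep, maxRunsStep, if_neg h]
        split_ifs <;> simp [PySem.Dict.getD_insert, h']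
    · -- new count = new trailing run (0 if the new prev is not c)
      by_cases h : ch = c
      · subst h
        by_cases hp : prev = some ch
        · simp [checkSizeStep, maxRunsStep, hp]
        · have hp' : ¬ some ch = prev := fun e => hp e.symm
          simp [checkSizeStep, maxRunsStep, hp, hp']
      · simp [checkSizeStep, maxRunsStep, h]
    · -- new flag = (new prev is c)
      by_cases h : ch = c
      · subst h; simp [checkSizeStep, maxRunsStep]
      · simp [checkSizeStep, maxRunsStep, h]

-- A's per-symbol scan equals B's dict lookup.
theorem check_size_eq_maxRuns (s : String) (c : Char) :
    check_size s c = (maxRuns s).getD c 0 := by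
  unfold check_size maxRuns
  rw [PySem.List.foldl_pyRange_zero_pyGetD' s.toList ' ' (checkSizeStep c) (0, 0, false)]
  exact run_inv s.toList c (0, 0, false) (PySem.Dict.empty, none, 0) (by simp) (by simp) (by simp)

-- ===== VERDICT (by name: the statement is the Claim_ definition above) =====
theorem check_ticket_spec : Claim_equal_check_ticket := by
  intro t1 t2 _
  show check_ticket t1 t2 = check_ticket_alt t1 t2
  unfold check_ticket check_ticket_alt
  simp only [check_size_eq_maxRuns]
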